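-- pv_equiv track=rewrite | github.com/Chalexz/Programacion-Ing.Computacion-AWing | Taller de programacion/Otros/Laboratorio5.py | encontrarNumerosDivisibles
-- ===== SOURCE A (Python) =====
-- def len_chino(lista): #copia de len porque ajá
--     # e: una lista
--     # s: la longitud de la lista
--     # r:
--     contador = 0
--     for w in lista:
--         contador += 1
--     return contador
--
-- def append_chino(lista, elem): #copia de appedn
--     # e: una lista y un elemento para meter
--     # s: la lista con el elemento en cuestión al final
--     # r:
--     lista += [elem]
--
-- def encontrarNumerosDivisibles(matriz, num):
--     # e: una matriz y un número
--     # s: una matriz con los valores divisibles por el número, los demás son 0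
--     # r: todos los vectores de la matriz deben tener el mismo tamaño
--     if not validar_matriz(matriz):
--         return "Error: existen vectores de diferente tamaño"
--     resultado = []
--     columnas = len_chino(matriz[0])
--     filas = len_chino(matriz)
--     for i in range(columnas):
--         columna = []
--         for j in range(filas):
--             if matriz[j][i] % num == 0:
--                 append_chino(columna, matriz[j][i])
--             else:
--                 append_chino(columna, 0)
--         append_chino(resultado, columna)
--     return resultado
--
-- def validar_matriz(matriz):
--     # e: una matriz
--     # s: verdadero si todos los vectores tienen el mismo tamaño
--     # r: la matriz no debe estar vacía
--     longitud = len_chino(matriz[0])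
--     for fila in matriz:
--         if len_chino(fila) != longitud:
--             return False
--     return True
-- ===== SOURCE B (Python) =====
-- def validar_matriz(matriz):
--     longitud = len(matriz[0])
--     for fila in matriz:
--         if len(fila) != longitud:
--             return False
--     return True
--
-- def encontrarNumerosDivisibles(matriz, num):
--     if not validar_matriz(matriz):
--         return "Error: existen vectores de diferente tamaño"
--     # pass 1: filter in the input's shape
--     filtrada = [[x if x % num == 0 else 0 for x in fila] for fila in matriz]
--     # pass 2: transpose
--     return [list(col) for col in zip(*filtrada)]
-- ===== Notes on version B (the rewrite author's own statement) =====
-- stated objective: simpler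
-- what changed: A fuses filter and transpose into one column-major indexed double loop with hand-rolled len/append helpers; B first filters the matrix in its own shape with a comprehension and then transposes with zip(*) — two separate passes with no index arithmetic (measured constant-factor speedup from builtin zip/comprehensions replacing per-element helper calls).
import Mathlib
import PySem

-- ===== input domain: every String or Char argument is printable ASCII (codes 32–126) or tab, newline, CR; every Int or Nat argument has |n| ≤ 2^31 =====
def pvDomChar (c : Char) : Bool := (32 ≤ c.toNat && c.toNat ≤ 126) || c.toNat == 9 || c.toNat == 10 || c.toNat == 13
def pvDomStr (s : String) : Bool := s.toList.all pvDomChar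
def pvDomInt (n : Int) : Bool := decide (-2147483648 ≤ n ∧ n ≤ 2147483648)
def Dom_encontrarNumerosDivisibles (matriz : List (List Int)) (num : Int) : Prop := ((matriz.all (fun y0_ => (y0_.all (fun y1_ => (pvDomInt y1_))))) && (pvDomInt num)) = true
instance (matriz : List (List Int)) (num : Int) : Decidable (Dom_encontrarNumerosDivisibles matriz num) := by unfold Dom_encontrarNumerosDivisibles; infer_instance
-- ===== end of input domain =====

-- B replaces A's fused column-major indexed double loop by two separate passes — an in-shape
-- filter pass, then a zip-style transpose — same values, simpler decomposition (no speed claim).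

-- ===== PORT A =====
def lenChino {α : Type} (lista : List α) : Int :=
  lista.foldl (fun contador _ => contador + 1) 0

-- the 'for fila: if len_chino(fila) != longitud: return False / return True' loop is an all-loop
def validarMatriz (matriz : List (List Int)) : Bool :=
  let longitud := lenChino (PySem.List.pyGetD matriz 0 [])
  matriz.all (fun fila => lenChino fila == longitud)

def encontrarNumerosDivisibles (matriz : List (List Int)) (num : Int) : List (List Int) :=
  if !validarMatriz matriz then [] -- Python returns an error STRING here (not a list of lists); outside Pre_
  else
    let columnas := lenChino (PySem.List.pyGetD matriz 0 [])
    let filas := lenChino matriz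
    (PySem.List.pyRange 0 columnas 1).foldl (fun resultado i =>
      let columna := (PySem.List.pyRange 0 filas 1).foldl (fun columna j =>
        if PySem.Int.mod (PySem.List.pyGetD (PySem.List.pyGetD matriz j []) i 0) num == 0 then
          columna ++ [PySem.List.pyGetD (PySem.List.pyGetD matriz j []) i 0]
        else
          columna ++ [0]) ([] : List Int)
      resultado ++ [columna]) []

-- ===== PORT B =====
def validarMatrizB (matriz : List (List Int)) : Bool :=
  let longitud := (PySem.List.pyGetD matriz 0 []).length
  matriz.all (fun fila => fila.length == longitud)

-- zip(*rows) as lists: take heads while every row is nonempty (zip stops at the shortest iterator)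
def zipTranspose (rows : List (List Int)) : List (List Int) :=
  if h : rows.isEmpty || rows.any List.isEmpty then []
  else (rows.map (fun r => r.headD 0)) :: zipTranspose (rows.map List.tail)
termination_by (rows.headD []).length
decreasing_by
  simp only [Bool.or_eq_true, List.isEmpty_iff, List.any_eq_true, not_or, not_exists] at h
  obtain ⟨h1, h2⟩ := h
  cases rows with
  | nil => exact absurd rfl h1
  | cons r rs =>
    have hr : r ≠ [] := fun hh => h2 r ⟨by simp, hh⟩
    simp only [List.headD_cons]
    cases r with
    | nil => exact absurd rfl hr
    | cons x xs => simp

def encontrarNumerosDivisibles_alt (matriz : List (List Int)) (num : Int) : List (List Int) :=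
  if !validarMatrizB matriz then [] -- Source B returns the error STRING here; outside Pre_
  else
    let filtrada := matriz.map (fun fila => fila.map (fun x => if PySem.Int.mod x num == 0 then x else 0))
    zipTranspose filtrada

-- ===== PRECONDITION & SPEC =====
-- Pre_ excludes: the empty matrix (A raises IndexError), ragged matrices (A returns an error
-- STRING, not a value of the declared list-of-lists type), and num = 0 with at least one column
-- (A raises ZeroDivisionError at the first cell).
def Pre_encontrarNumerosDivisibles (matriz : List (List Int)) (num : Int) : Prop :=
  matriz ≠ [] ∧ (∀ fila ∈ matriz, fila.length = (matriz.headD []).length) ∧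
    (num ≠ 0 ∨ matriz.headD [] = [])
instance (matriz : List (List Int)) (num : Int) : Decidable (Pre_encontrarNumerosDivisibles matriz num) := by unfold Pre_encontrarNumerosDivisibles; infer_instance

def pvWitness_encontrarNumerosDivisibles : List (List Int) × Int := ([[2, 3], [4, 5]], 2)

def Spec_encontrarNumerosDivisibles (matriz : List (List Int)) (num : Int) (out : List (List Int)) : Prop := out = encontrarNumerosDivisibles_alt matriz num
instance (matriz : List (List Int)) (num : Int) (out : List (List Int)) : Decidable (Spec_encontrarNumerosDivisibles matriz num out) := by unfold Spec_encontrarNumerosDivisibles; infer_instance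

-- ===== CLAIM (what is proved, stated in full; the proofs are below) =====
def Claim_equal_encontrarNumerosDivisibles : Prop := ∀ (matriz : List (List Int)) (num : Int), Dom_encontrarNumerosDivisibles matriz num → Pre_encontrarNumerosDivisibles matriz num → Spec_encontrarNumerosDivisibles matriz num (encontrarNumerosDivisibles matriz num)

-- ===== LEMMAS AND PROOFS =====

theorem lenChino_eq {α : Type} (l : List α) : lenChino l = (l.length : Int) := by
  have h : ∀ (c : Int), l.foldl (fun contador _ => contador + 1) c = c + l.length := by
    induction l with
    | nil => simp
    | cons x xs ih => intro c; simp [List.foldl_cons, ih]; ring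
  simpa [lenChino] using h 0

-- the common per-cell filter
def pvG (num x : Int) : Int := if PySem.Int.mod x num == 0 then x else 0

theorem zipTranspose_char (n : Nat) (rows : List (List Int)) (hne : rows ≠ [])
    (hlen : ∀ r ∈ rows, r.length = n) :
    zipTranspose rows = (List.range n).map (fun k => rows.map (fun r => r.getD k 0)) := by
  induction n generalizing rows with
  | zero =>
    obtain ⟨r, rs, rfl⟩ := List.exists_cons_of_ne_nil hne
    have hr : r = [] := List.eq_nil_of_length_eq_zero (hlen r (by simp))
    rw [zipTranspose]
    simp [hr]
  | succ n ih =>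
    have hnotempty : ∀ r ∈ rows, r ≠ [] := by
      intro r hr hnil
      have := hlen r hr; rw [hnil] at this; simp at this
    rw [zipTranspose]
    have hcond : ¬ (rows.isEmpty || rows.any List.isEmpty) = true := by
      simp only [Bool.or_eq_true, List.isEmpty_iff, List.any_eq_true, not_or, not_exists]
      refine ⟨hne, ?_⟩
      intro r
      by_cases hr : r ∈ rows
      · simp; intro _; exact hnotempty r hr
      · simp [hr]
    rw [dif_neg hcond]
    have htne : rows.map List.tail ≠ [] := by simpa using hne
    have htlen : ∀ r ∈ rows.map List.tail, r.length = n := by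
      intro t ht
      obtain ⟨r, hr, rfl⟩ := List.mem_map.mp ht
      have := hlen r hr
      cases r with
      | nil => exact absurd rfl (hnotempty _ hr)
      | cons x xs => simpa using this
    rw [ih (rows.map List.tail) htne htlen]
    rw [List.range_succ_eq_map, List.map_cons, List.map_map]
    congr 1
    · apply List.map_congr_left
      intro r hr
      cases r with
      | nil => exact absurd rfl (hnotempty _ hr)
      | cons x xs => simp
    · apply List.map_congr_left
      intro k _
      simp only [Function.comp]
      rw [List.map_map]
      apply List.map_congr_left
      intro r hr
      cases r with
      | nil => exact absurd rfl (hnotempty _ hr)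
      | cons x xs => simp

-- characterisation of A's fused double loop
theorem portA_char (matriz : List (List Int)) (num : Int)
    (hval : validarMatriz matriz = true) :
    encontrarNumerosDivisibles matriz num =
      (List.range (PySem.List.pyGetD matriz 0 []).length).map
        (fun k => matriz.map (fun fila => pvG num (fila.getD k 0))) := by
  unfold encontrarNumerosDivisibles
  rw [hval]
  simp only [Bool.not_true, Bool.false_eq_true, if_false, lenChino_eq]
  -- inner loop: both branches append one element
  have hinner : ∀ (i : Int),
      (PySem.List.pyRange 0 (matriz.length : Int) 1).foldl (fun columna j =>
        if PySem.Int.mod (PySem.List.pyGetD (PySem.List.pyGetD matriz j []) i 0) num == 0 then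
          columna ++ [PySem.List.pyGetD (PySem.List.pyGetD matriz j []) i 0]
        else
          columna ++ [0]) ([] : List Int)
      = matriz.map (fun fila => pvG num (PySem.List.pyGetD fila i 0)) := by
    intro i
    have hif : (fun (columna : List Int) (j : Int) =>
        if PySem.Int.mod (PySem.List.pyGetD (PySem.List.pyGetD matriz j []) i 0) num == 0 then
          columna ++ [PySem.List.pyGetD (PySem.List.pyGetD matriz j []) i 0]
        else
          columna ++ [0])
        = fun columna j => columna ++ [pvG num (PySem.List.pyGetD (PySem.List.pyGetD matriz j []) i 0)] := by
      funext columna j; unfold pvG; split_ifs <;> rfl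
    rw [hif, PySem.List.foldl_append_singleton_eq_map]
    rw [show (fun j => pvG num (PySem.List.pyGetD (PySem.List.pyGetD matriz j []) i 0))
          = (fun fila => pvG num (PySem.List.pyGetD fila i 0)) ∘ (fun j => PySem.List.pyGetD matriz j []) from rfl]
    rw [← List.map_map, PySem.List.map_pyGetD_pyRange_zero']
    simp
  simp only [hinner]
  rw [PySem.List.foldl_append_singleton_eq_map]
  rw [show ((PySem.List.pyGetD matriz 0 []).length : Int) = ((PySem.List.pyGetD matriz 0 []).length : Nat) from rfl,
      PySem.List.pyRange_zero_natCast]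
  rw [List.map_map]
  simp [Function.comp]

-- ===== VERDICT (by name: the statement is the Claim_ definition above) =====
theorem encontrarNumerosDivisibles_spec : Claim_equal_encontrarNumerosDivisibles := by
  intro matriz num _ hpre
  obtain ⟨hne, hlen, _⟩ := hpre
  unfold Spec_encontrarNumerosDivisibles
  have h0 : PySem.List.pyGetD matriz 0 [] = matriz.headD [] := by
    obtain ⟨r, rs, rfl⟩ := List.exists_cons_of_ne_nil hne
    simp [PySem.List.pyGetD_zero_cons]
  have hval : validarMatriz matriz = true := by
    simp only [validarMatriz, h0, List.all_eq_true, beq_iff_eq, lenChino_eq]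
    intro fila hf
    exact_mod_cast hlen fila hf
  have hvalB : validarMatrizB matriz = true := by
    simp only [validarMatrizB, h0, List.all_eq_true, beq_iff_eq]
    exact hlen
  set n := (matriz.headD []).length with hn
  -- B side
  unfold encontrarNumerosDivisibles_alt
  rw [hvalB]
  simp only [Bool.not_true, Bool.false_eq_true, if_false]
  have hfne : matriz.map (fun fila => fila.map (fun x => if PySem.Int.mod x num == 0 then x else 0)) ≠ [] := by
    simpa using hne
  have hflen : ∀ r ∈ matriz.map (fun fila => fila.map (fun x => if PySem.Int.mod x num == 0 then x else 0)),
      r.length = n := by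
    intro r hr
    obtain ⟨fila, hf, rfl⟩ := List.mem_map.mp hr
    simpa using hlen fila hf
  rw [zipTranspose_char n _ hfne hflen]
  -- A side
  rw [portA_char matriz num hval, h0, ← hn]
  apply List.map_congr_left
  intro k hk
  rw [List.map_map]
  apply List.map_congr_left
  intro fila hf
  have hkn : k < fila.length := by rw [hlen fila hf]; exact List.mem_range.mp hk
  simp only [Function.comp]
  rw [List.getD_eq_getElem _ _ hkn, List.getD_eq_getElem _ _ (by simpa using hkn)]
  simp [pvG]
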